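-- pv_equiv track=rewrite | github.com/MrBrantCode/unitest_baseline | mut_generate/mist_train_cf/cf_60314/solution.py | separates_elements
-- ===== SOURCE A (Python) =====
-- import math
--
-- def separates_elements(arr):
--     """
--     This function separates the Fibonacci numbers from the non-Fibonacci numbers in the input array.
--
--     Parameters:
--     arr (list): A list of integers.
--
--     Returns:
--     tuple: A tuple containing two lists. The first list contains the Fibonacci numbers in descending order,
--            and the second list contains the non-Fibonacci numbers in ascending order. If the input array
--            contains non-numeric data, it returns an error message "Error: Non-numeric data inputs found".
--     """
--
--     # Helper function to check if a number is a Fibonacci number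
--     def is_fibonacci(n):
--         x = 5 * n * n + 4
--         y = 5 * n * n - 4
--         return math.isqrt(x) ** 2 == x or math.isqrt(y) ** 2 == y
--
--     try:
--         fibonacci = sorted([num for num in arr if isinstance(num, int) and is_fibonacci(num)], reverse=True)
--         non_fibonacci = sorted([num for num in arr if isinstance(num, int) and not is_fibonacci(num)])
--         return fibonacci, non_fibonacci
--     except TypeError:
--         return "Error: Non-numeric data inputs found"
-- ===== SOURCE B (Python) =====
-- import math
--
-- def separates_elements(arr):
--     # One sort of the int elements, then a single partition pass; fib list reversed for descending order.
--     def is_fibonacci(n):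
--         x = 5 * n * n + 4
--         s = math.isqrt(x)
--         if s * s == x:
--             return True
--         y = x - 8  # 5*n*n - 4
--         if y < 0:
--             return False
--         t = math.isqrt(y)
--         return t * t == y
--
--     try:
--         ints = sorted(n for n in arr if isinstance(n, int))
--     except TypeError:
--         return "Error: Non-numeric data inputs found"
--     fib, nonfib = [], []
--     for n in ints:
--         (fib if is_fibonacci(n) else nonfib).append(n)
--     return fib[::-1], nonfib
-- ===== Notes on version B (the rewrite author's own statement) =====
-- stated objective: faster
-- what changed: B sorts the elements once and partitions the sorted list in a single pass (reversing the Fibonacci part for descending order), instead of A's two filtered sorts; B's is_fibonacci also short-circuits before the second isqrt.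
import Mathlib
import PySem

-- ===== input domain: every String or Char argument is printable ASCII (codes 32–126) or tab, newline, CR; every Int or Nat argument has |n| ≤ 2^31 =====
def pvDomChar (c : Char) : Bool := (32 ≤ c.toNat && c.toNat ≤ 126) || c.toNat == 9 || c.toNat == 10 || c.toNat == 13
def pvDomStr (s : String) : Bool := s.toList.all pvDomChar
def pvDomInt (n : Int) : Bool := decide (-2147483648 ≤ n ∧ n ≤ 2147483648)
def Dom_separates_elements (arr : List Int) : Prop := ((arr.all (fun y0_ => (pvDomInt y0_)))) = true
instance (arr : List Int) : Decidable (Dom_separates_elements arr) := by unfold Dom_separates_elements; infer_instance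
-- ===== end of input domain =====

-- B changes: one sort + single partition pass instead of A's two filtered sorts; return value only
-- (neither version mutates its argument). On a List Int the isinstance filter is the identity and
-- the TypeError branch is unreachable, so neither appears in the ports.

-- ===== PORT A =====
-- math.isqrt x = Nat.sqrt (floor square root); x = 5n²+4 ≥ 0 always, and the y-disjunct is only
-- evaluated when the x-disjunct is false, in which case y = 5n²-4 ≥ 0 (n ≠ 0), so .toNat is exact here.
def isFibA (n : Int) : Bool :=
  let x := 5 * n * n + 4
  let y := 5 * n * n - 4
  ((Nat.sqrt x.toNat : Int) ^ 2 == x) || ((Nat.sqrt y.toNat : Int) ^ 2 == y)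

def separates_elements (arr : List Int) : List Int × List Int :=
  let fibonacci := PySem.List.sorted (arr.filter (fun num => isFibA num)) (fun x => x) true
  let non_fibonacci := PySem.List.sorted (arr.filter (fun num => !isFibA num)) (fun x => x) false
  (fibonacci, non_fibonacci)

-- ===== PORT B =====
def isFibB (n : Int) : Bool :=
  let x := 5 * n * n + 4
  let s : Int := (Nat.sqrt x.toNat : Int)
  if s * s == x then true
  else
    let y := x - 8
    if y < 0 then false
    else
      let t : Int := (Nat.sqrt y.toNat : Int)
      t * t == y

def separates_elements_alt (arr : List Int) : List Int × List Int :=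
  let ints := PySem.List.sorted arr (fun x => x) false
  let p := ints.foldl
    (fun (acc : List Int × List Int) n =>
      if isFibB n then (acc.1 ++ [n], acc.2) else (acc.1, acc.2 ++ [n]))
    ([], [])
  (p.1.reverse, p.2)

-- ===== PRECONDITION & SPEC =====
def Spec_separates_elements (arr : List Int) (out : List Int × List Int) : Prop := out = separates_elements_alt arr
instance (arr : List Int) (out : List Int × List Int) : Decidable (Spec_separates_elements arr out) := by unfold Spec_separates_elements; infer_instance

-- ===== CLAIM (what is proved, stated in full; the proofs are below) =====
def Claim_equal_separates_elements : Prop := ∀ (arr : List Int), Dom_separates_elements arr → Spec_separates_elements arr (separates_elements arr)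

-- ===== LEMMAS AND PROOFS =====

-- the two Fibonacci tests agree
lemma isFib_eq (n : Int) : isFibA n = isFibB n := by
  unfold isFibA isFibB
  simp only [pow_two]
  by_cases h1 : ((Nat.sqrt (5 * n * n + 4).toNat : Int) * (Nat.sqrt (5 * n * n + 4).toNat : Int) == 5 * n * n + 4)
  · simp [h1]
  · by_cases hy : 5 * n * n + 4 - 8 < 0
    · have hy' : 5 * n * n - 4 < 0 := by omega
      have : ((Nat.sqrt (5 * n * n - 4).toNat : Int) * (Nat.sqrt (5 * n * n - 4).toNat : Int) == 5 * n * n - 4) = false := by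
        rw [beq_eq_false_iff_ne]
        intro h
        have : (0:Int) ≤ (Nat.sqrt (5 * n * n - 4).toNat : Int) * (Nat.sqrt (5 * n * n - 4).toNat : Int) :=
          mul_nonneg (by positivity) (by positivity)
        omega
      simp [h1, hy, this]
    · have heq : 5 * n * n + 4 - 8 = 5 * n * n - 4 := by ring
      simp [h1, heq]
      intro _
      omega

-- the partition fold, characterised
lemma fold_partition (l : List Int) (a b : List Int) :
    l.foldl
      (fun (acc : List Int × List Int) n =>
        if isFibB n then (acc.1 ++ [n], acc.2) else (acc.1, acc.2 ++ [n]))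
      (a, b)
      = (a ++ l.filter (fun n => isFibB n), b ++ l.filter (fun n => !isFibB n)) := by
  induction l generalizing a b with
  | nil => simp
  | cons x t ih =>
    by_cases hx : isFibB x
    · simp [List.foldl_cons, hx, ih]
    · simp [List.foldl_cons, hx, ih]

-- filtering a stably sorted list = sorting the filtered list (Int, identity key)
lemma filter_sorted (arr : List Int) (p : Int → Bool) :
    (PySem.List.sorted arr (fun x => x) false).filter p
      = PySem.List.sorted (arr.filter p) (fun x => x) false := by
  apply PySem.List.eq_of_perm_of_pairwise_le_of_injective (key := fun x : Int => x)
    (fun _ _ h => h)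
  · exact ((PySem.List.sorted_perm arr (fun x => x) false).filter p).trans
      (PySem.List.sorted_perm (arr.filter p) (fun x => x) false).symm
  · exact (PySem.List.sorted_pairwise arr (fun x => x)).filter p
  · exact PySem.List.sorted_pairwise (arr.filter p) (fun x => x)

-- the descending sort is the reverse of the filtered ascending sort
lemma rev_sorted (arr : List Int) (p : Int → Bool) :
    PySem.List.sorted (arr.filter p) (fun x => x) true
      = ((PySem.List.sorted arr (fun x => x) false).filter p).reverse := by
  have h : (PySem.List.sorted (arr.filter p) (fun x => x) true).reverse
      = (PySem.List.sorted arr (fun x => x) false).filter p := by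
    apply PySem.List.eq_of_perm_of_pairwise_le_of_injective (key := fun x : Int => x)
      (fun _ _ h => h)
    · exact ((List.reverse_perm _).trans
        (PySem.List.sorted_perm (arr.filter p) (fun x => x) true)).trans
        (((PySem.List.sorted_perm arr (fun x => x) false).filter p).symm)
    · exact List.pairwise_reverse.mpr (PySem.List.sorted_pairwise_rev (arr.filter p) (fun x => x))
    · exact (PySem.List.sorted_pairwise arr (fun x => x)).filter p
  rw [← h, List.reverse_reverse]

-- ===== VERDICT (by name: the statement is the Claim_ definition above) =====
theorem separates_elements_spec : Claim_equal_separates_elements := by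
  intro arr _
  unfold Spec_separates_elements separates_elements separates_elements_alt
  simp only [fold_partition, List.nil_append]
  have hf : ∀ n : Int, isFibA n = isFibB n := isFib_eq
  refine Prod.ext ?_ ?_
  · rw [show (fun num => isFibA num) = (fun n => isFibB n) from funext hf]
    exact rev_sorted arr _
  · rw [show (fun num => !isFibA num) = (fun n => !isFibB n) from funext (fun n => by rw [hf])]
    exact (filter_sorted arr _).symm
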